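-- pv_equiv track=rewrite | github.com/mepavan7/python-leetcode | maxpairsum.py | maxPairSum
-- ===== SOURCE A (Python) =====
-- def maxPairSum(nums, k):
--     nums.sort()
--     l = 0
--     r = len(nums) - 1
--     max_pair = -1
--     while l < r:
--         s = nums[l] + nums[r]
--         if s < k:
--             max_pair = max(max_pair, s)
--             l += 1
--         else:
--             r -= 1
--     return max_pair
-- ===== SOURCE B (Python) =====
-- def maxPairSum(nums, k):
--     # Return value of A = max over all unordered pairs of a sum < k, else -1.
--     # That maximum does not depend on the order of nums, so no sort, no two pointers:
--     # peel one element at a time and fold over its remaining partners.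
--     # NOTE: A sorts nums in place; B does not mutate its argument
--     # (the equivalence is about the return value).
--     best = -1
--     rest = list(nums)
--     while rest:
--         x = rest.pop(0)
--         for y in rest:
--             s = x + y
--             if s < k and s > best:
--                 best = s
--     return best
-- ===== Notes on version B (the rewrite author's own statement) =====
-- stated objective: alternative
-- what changed: Replaces sort + two-pointer sweep with a sort-free recursive scan over all pairs, exploiting that the max pair sum below k is order-invariant (and B does not mutate nums).
import Mathlib
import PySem

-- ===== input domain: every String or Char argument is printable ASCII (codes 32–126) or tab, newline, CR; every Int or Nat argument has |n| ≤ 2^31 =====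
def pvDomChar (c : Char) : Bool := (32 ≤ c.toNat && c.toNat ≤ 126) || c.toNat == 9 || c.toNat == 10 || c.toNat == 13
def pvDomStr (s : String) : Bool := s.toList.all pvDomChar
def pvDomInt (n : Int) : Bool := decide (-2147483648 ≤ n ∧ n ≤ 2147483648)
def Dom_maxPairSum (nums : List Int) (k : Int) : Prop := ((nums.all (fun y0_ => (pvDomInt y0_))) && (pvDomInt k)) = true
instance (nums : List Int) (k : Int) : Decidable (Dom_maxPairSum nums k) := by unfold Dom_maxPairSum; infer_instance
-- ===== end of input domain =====

-- B replaces A's sort + two-pointer sweep by a sort-free recursive scan over all pairs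
-- (the max pair sum below k is order-invariant); same return value. NOTE: A sorts nums
-- in place; B does not mutate its argument — the equivalence proved is about the return value.

-- ===== PORT A =====
-- the while loop of A: state (l, r, max_pair); indices are always in range when read,
-- so '.getD 0' only makes the lookup total (it is never the result)
def loopA (s : List Int) (k : Int) (l r m : Int) : Int :=
  if l < r then
    if (PySem.List.pyGet? s l).getD 0 + (PySem.List.pyGet? s r).getD 0 < k then
      loopA s k (l + 1) r (max m ((PySem.List.pyGet? s l).getD 0 + (PySem.List.pyGet? s r).getD 0))
    else loopA s k l (r - 1) m
  else m
termination_by (r - l).toNat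
decreasing_by all_goals omega

def maxPairSum (nums : List Int) (k : Int) : Int :=
  let s := PySem.List.sorted nums (fun x => x) false
  loopA s k 0 ((s.length : Int) - 1) (-1)

-- ===== PORT B =====
-- Source B's recursion go(xs, best): peel the head, fold its partners, recurse on the tail
def goB (k : Int) : List Int → Int → Int
  | [], best => best
  | x :: rest, best =>
      goB k rest (rest.foldl (fun b y => if x + y < k ∧ x + y > b then x + y else b) best)

def maxPairSum_alt (nums : List Int) (k : Int) : Int := goB k nums (-1)

-- ===== PRECONDITION & SPEC =====
def Spec_maxPairSum (nums : List Int) (k : Int) (out : Int) : Prop := out = maxPairSum_alt nums k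
instance (nums : List Int) (k : Int) (out : Int) : Decidable (Spec_maxPairSum nums k out) := by unfold Spec_maxPairSum; infer_instance

-- ===== CLAIM (what is proved, stated in full; the proofs are below) =====
def Claim_equal_maxPairSum : Prop := ∀ (nums : List Int) (k : Int), Dom_maxPairSum nums k → Spec_maxPairSum nums k (maxPairSum nums k)

-- ===== LEMMAS AND PROOFS =====

-- one fold step: record a sum when it is below k
def step (k b s : Int) : Int := if s < k then max b s else b

-- all pair sums of a list (order irrelevant up to permutation)
def pairSums : List Int → List Int
  | [] => []
  | x :: xs => xs.map (x + ·) ++ pairSums xs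

-- the canonical value both programs compute
def M (k m : Int) (xs : List Int) : Int := xs.foldl (step k) m

theorem M_append (k m : Int) (xs ys : List Int) : M k m (xs ++ ys) = M k (M k m xs) ys := by
  simp [M, List.foldl_append]

theorem step_left_comm (k b a c : Int) : step k (step k b a) c = step k (step k b c) a := by
  simp only [step]; split_ifs <;> omega

theorem M_perm (k : Int) {xs ys : List Int} (h : xs.Perm ys) (m : Int) :
    M k m xs = M k m ys := by
  induction h generalizing m with
  | nil => rfl
  | cons x h ih => simp only [M, List.foldl_cons] at *; exact ih _
  | swap x y l => simp only [M, List.foldl_cons]; rw [step_left_comm]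
  | trans h₁ h₂ ih₁ ih₂ => rw [ih₁, ih₂]

theorem pairSums_perm {xs ys : List Int} (h : xs.Perm ys) : (pairSums xs).Perm (pairSums ys) := by
  induction h with
  | nil => exact List.Perm.refl _
  | cons x h ih => exact (h.map _).append ih
  | swap x y l =>
      simp only [pairSums, List.map_cons]
      rw [Int.add_comm y x]
      refine List.Perm.cons _ ?_
      have h2 := (List.perm_append_comm
        (l₁ := l.map (y + ·)) (l₂ := l.map (x + ·))).append_right (pairSums l)
      rw [List.append_assoc, List.append_assoc] at h2
      exact h2
  | trans h₁ h₂ ih₁ ih₂ => exact ih₁.trans ih₂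

theorem pairSums_append_singleton (ys : List Int) (z : Int) :
    (pairSums (ys ++ [z])).Perm (pairSums ys ++ ys.map (· + z)) := by
  induction ys with
  | nil => simp [pairSums]
  | cons y ys ih =>
      simp only [List.cons_append, pairSums, List.map_cons]
      rw [List.map_append]
      simp only [List.map_cons, List.map_nil]
      refine (List.Perm.append_left _ ih).trans ?_
      have e1 : (ys.map (y + ·) ++ [y + z]) ++ (pairSums ys ++ ys.map (· + z))
          = ys.map (y + ·) ++ ((y + z) :: (pairSums ys ++ ys.map (· + z))) := by
        simp [List.append_assoc]
      rw [e1]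
      refine (List.Perm.append_left _ List.perm_middle.symm).trans ?_
      have e2 : ys.map (y + ·) ++ (pairSums ys ++ (y + z) :: ys.map (· + z))
          = (ys.map (y + ·) ++ pairSums ys) ++ ((y + z) :: ys.map (· + z)) := by
        simp [List.append_assoc]
      rw [e2]

theorem M_skip (k m : Int) {xs : List Int} (h : ∀ s ∈ xs, ¬ s < k) : M k m xs = m := by
  induction xs generalizing m with
  | nil => rfl
  | cons x xs ih =>
      simp only [M, List.foldl_cons]
      rw [show step k m x = m by simp [step, h x (by simp)]]
      exact ih m (fun s hs => h s (List.mem_cons_of_mem _ hs))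

theorem M_le (k : Int) {xs : List Int} {b : Int} (h : ∀ s ∈ xs, s ≤ b) : M k b xs = b := by
  induction xs with
  | nil => rfl
  | cons x xs ih =>
      simp only [M, List.foldl_cons]
      rw [show step k b x = b by
        simp only [step]; split_ifs with h1
        · exact max_eq_left (h x (by simp))
        · rfl]
      exact ih (fun s hs => h s (List.mem_cons_of_mem _ hs))

theorem M_max (k : Int) {xs : List Int} {c : Int}
    (hall : ∀ s ∈ xs, s ≤ c) (hk : c < k) (hmem : c ∈ xs) (m : Int) :
    M k m xs = max m c := by
  induction xs generalizing m with
  | nil => cases hmem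
  | cons x xs ih =>
      simp only [M, List.foldl_cons]
      rcases List.mem_cons.mp hmem with rfl | hc
      · rw [show step k m c = max m c by simp [step, hk]]
        exact M_le k (fun s hs => le_trans (hall s (List.mem_cons_of_mem _ hs)) (le_max_right m c))
      · have hx : x ≤ c := hall x (by simp)
        show M k (step k m x) xs = max m c
        rw [ih (fun s hs => hall s (List.mem_cons_of_mem _ hs)) hc (step k m x)]
        simp only [step]; split_ifs <;> omega

-- the segment of s at integer indices l..r (empty when l > r)
def seg (s : List Int) (l r : Int) : List Int := (s.drop l.toNat).take (r - l + 1).toNat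

theorem pairSums_short {xs : List Int} (h : xs.length ≤ 1) : pairSums xs = [] := by
  match xs, h with
  | [], _ => rfl
  | [x], _ => simp [pairSums]

theorem seg_cons (s : List Int) (l r : Int) (h0 : 0 ≤ l) (hlr : l < r) (hr : r < (s.length : Int)) :
    seg s l r = s[l.toNat]'(by omega) :: seg s (l + 1) r := by
  have hl : l.toNat < s.length := by omega
  simp only [seg]
  rw [List.drop_eq_getElem_cons hl]
  rw [show (r - l + 1).toNat = (r - (l + 1) + 1).toNat + 1 by omega,
      show (l + 1).toNat = l.toNat + 1 by omega]
  rfl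

theorem seg_snoc (s : List Int) (l r : Int) (h0 : 0 ≤ l) (hlr : l ≤ r) (hr : r < (s.length : Int)) :
    seg s l r = seg s l (r - 1) ++ [s[r.toNat]'(by omega)] := by
  have hn : (r - l + 1).toNat = (r - l).toNat + 1 := by omega
  have hlen : (r - l).toNat < (s.drop l.toNat).length := by
    simp only [List.length_drop]; omega
  simp only [seg, hn]
  rw [List.take_add_one, show (r - 1 - l + 1).toNat = (r - l).toNat by omega]
  congr 1
  rw [List.getElem?_eq_getElem hlen]
  simp only [List.getElem_drop, Option.toList_some]
  congr 2
  omega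

theorem mem_seg {s : List Int} {l r y : Int} (h0 : 0 ≤ l) (hr : r < (s.length : Int))
    (hy : y ∈ seg s l r) :
    ∃ j : Nat, l.toNat ≤ j ∧ (j : Int) ≤ r ∧ ∃ hj : j < s.length, y = s[j] := by
  obtain ⟨i, hi, hget⟩ := List.getElem_of_mem hy
  have hi1 : i < (r - l + 1).toNat := lt_of_lt_of_le hi (by simp [seg, List.length_take])
  have hi2 : i < (s.drop l.toNat).length := by
    have := hi; simp only [seg, List.length_take] at this; omega
  simp only [List.length_drop] at hi2
  refine ⟨l.toNat + i, by omega, by omega, by omega, ?_⟩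
  rw [← hget]
  simp only [seg]
  rw [List.getElem_take, List.getElem_drop]

theorem loopA_eq (s : List Int) (k : Int)
    (hs : ∀ (p q : Nat) (hpq : p ≤ q) (hq : q < s.length),
      s[p]'(Nat.lt_of_le_of_lt hpq hq) ≤ s[q]) :
    ∀ (n : Nat) (l r m : Int), (r - l).toNat ≤ n → 0 ≤ l → r < (s.length : Int) →
      loopA s k l r m = M k m (pairSums (seg s l r)) := by
  intro n
  induction n with
  | zero =>
      intro l r m hn h0 hr
      have hnl : ¬ l < r := by omega
      rw [loopA, if_neg hnl]
      rw [pairSums_short (by simp only [seg, List.length_take]; omega)]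
      rfl
  | succ n ih =>
      intro l r m hn h0 hr
      by_cases hlr : l < r
      · have hlN : l.toNat < s.length := by omega
        have hrN : r.toNat < s.length := by omega
        have hgl : (PySem.List.pyGet? s l).getD 0 = s[l.toNat] := by
          rw [PySem.List.pyGet?_eq_some_getElem s h0 (by omega)]; rfl
        have hgr : (PySem.List.pyGet? s r).getD 0 = s[r.toNat] := by
          rw [PySem.List.pyGet?_eq_some_getElem s (by omega) hr]; rfl
        rw [loopA, if_pos hlr]
        simp only [hgl, hgr]
        set c := s[l.toNat] + s[r.toNat] with hc
        have hmemr : s[r.toNat] ∈ seg s (l + 1) r := by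
          rw [seg_snoc s (l + 1) r (by omega) (by omega) hr]
          simp
        by_cases hck : c < k
        · rw [if_pos hck, ih (l + 1) r (max m c) (by omega) (by omega) hr]
          rw [seg_cons s l r h0 hlr hr]
          simp only [pairSums]
          rw [M_append]
          congr 1
          refine (M_max k ?_ hck ?_ m).symm
          · intro t ht
            obtain ⟨y, hy, rfl⟩ := List.mem_map.mp ht
            obtain ⟨j, hj1, hj2, hj3, rfl⟩ := mem_seg (show (0:Int) ≤ l + 1 by omega) hr hy
            have := hs j r.toNat (by omega) hrN
            omega
          · exact List.mem_map.mpr ⟨s[r.toNat], hmemr, rfl⟩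
        · rw [if_neg hck, ih l (r - 1) m (by omega) h0 (by omega)]
          rw [seg_snoc s l r h0 (by omega) hr]
          rw [M_perm k (pairSums_append_singleton _ _)]
          rw [M_append]
          refine (M_skip k _ ?_).symm
          intro t ht
          obtain ⟨y, hy, rfl⟩ := List.mem_map.mp ht
          obtain ⟨j, hj1, hj2, hj3, rfl⟩ := mem_seg h0 (show r - 1 < (s.length : Int) by omega) hy
          have := hs l.toNat j (by omega) hj3
          omega
      · rw [loopA, if_neg hlr]
        rw [pairSums_short (by simp only [seg, List.length_take]; omega)]
        rfl

theorem goB_eq (k : Int) (xs : List Int) (m : Int) : goB k xs m = M k m (pairSums xs) := by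
  induction xs generalizing m with
  | nil => rfl
  | cons x xs ih =>
      simp only [goB, pairSums]
      rw [ih, M_append]
      congr 1
      rw [M, List.foldl_map]
      congr 1
      funext b y
      simp only [step]
      split_ifs <;> omega

-- ===== VERDICT (by name: the statement is the Claim_ definition above) =====
theorem maxPairSum_spec : Claim_equal_maxPairSum := by
  intro nums k _
  unfold Spec_maxPairSum maxPairSum maxPairSum_alt
  set s := PySem.List.sorted nums (fun x => x) false with hsdef
  have hperm : s.Perm nums := PySem.List.sorted_perm nums (fun x => x) false
  have hs : ∀ (p q : Nat) (hpq : p ≤ q) (hq : q < s.length),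
      s[p]'(Nat.lt_of_le_of_lt hpq hq) ≤ s[q] := by
    intro p q hpq hq
    exact PySem.List.sorted_id_getElem_mono nums hpq hq
  rcases eq_or_ne s [] with hnil | hne
  · have hnums : nums = [] := by rw [hnil] at hperm; exact hperm.symm.eq_nil
    rw [hnil, hnums]
    rw [loopA]
    norm_num [goB]
  · have hlen : 0 < s.length := List.length_pos_iff.mpr hne
    rw [loopA_eq s k hs ((s.length : Int) - 1 - 0).toNat 0 ((s.length : Int) - 1) (-1)
        le_rfl (by omega) (by omega)]
    have hseg : seg s 0 ((s.length : Int) - 1) = s := by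
      simp only [seg, Int.toNat_zero, List.drop_zero]
      rw [show ((s.length : Int) - 1 - 0 + 1).toNat = s.length by omega, List.take_length]
    rw [hseg, goB_eq, M_perm k (pairSums_perm hperm.symm)]
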